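-- pv_equiv track=rewrite | github.com/arpit456jain/gfg-11-Weeks-Workshop-on-DSA-in-Python | week 4/hashing/Ruling Pair.py | RulingPair
-- ===== SOURCE A (Python) =====
-- def sumofdigits(n):
--     sum1 = 0
--     while (n):
--         r = n % 10
--         sum1 = sum1 + r
--         n = n // 10
--     return sum1
--
-- def RulingPair(arr, n):
--     # code here
--     hash_map = {}
--     max1 = -1
--     for i in arr:
--         sod1 = sumofdigits(i)
--         if sod1 in hash_map.keys():
--             sum_val = i + hash_map[sod1]
--             if sum_val > max1:
--                 max1 = sum_val
--             hash_map[sod1] = max(hash_map[sod1], i)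
--
--
--         else:
--             hash_map[sod1] = i
--     return max1
-- ===== SOURCE B (Python) =====
-- def sumofdigits(n):
--     sum1 = 0
--     while (n):
--         r = n % 10
--         sum1 = sum1 + r
--         n = n // 10
--     return sum1
--
-- def RulingPair(arr, n):
--     # group the elements by digit sum, then take the two largest of each group
--     groups = {}
--     for x in arr:
--         groups.setdefault(sumofdigits(x), []).append(x)
--     best = -1
--     for g in groups.values():
--         if len(g) >= 2:
--             m1 = m2 = -1
--             for x in g:
--                 if x > m1:
--                     m1, m2 = x, m1
--                 elif x > m2:
--                     m2 = x
--             best = max(best, m1 + m2)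
--     return best
-- ===== Notes on version B (the rewrite author's own statement) =====
-- stated objective: alternative
-- what changed: A does one pass keeping a per-digit-sum running max and updating a global best pair sum on the fly; B first builds a dict from digit sum to the list of elements with that digit sum, then scans each group of size >= 2 for its two largest values and takes the maximum group pair sum.
import Mathlib
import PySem

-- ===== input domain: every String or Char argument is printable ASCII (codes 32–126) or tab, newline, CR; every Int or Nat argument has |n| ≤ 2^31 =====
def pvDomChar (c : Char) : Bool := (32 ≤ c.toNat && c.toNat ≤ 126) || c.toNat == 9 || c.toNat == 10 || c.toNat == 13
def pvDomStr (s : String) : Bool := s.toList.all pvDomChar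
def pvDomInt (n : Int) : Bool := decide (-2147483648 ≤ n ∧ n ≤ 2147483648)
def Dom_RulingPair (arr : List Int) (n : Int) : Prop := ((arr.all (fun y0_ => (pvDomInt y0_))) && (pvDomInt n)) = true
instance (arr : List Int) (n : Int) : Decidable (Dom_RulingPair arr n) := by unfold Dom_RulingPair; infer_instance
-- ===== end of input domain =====

set_option maxHeartbeats 1000000

-- B groups the elements by digit sum and then scans each group for its two largest values,
-- instead of A's single pass with a per-key running max (objective: alternative decomposition).
-- ===== PORT A =====
-- shared helper, Python's sumofdigits; the fuel argument only makes the while-loop total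
-- (for n ≥ 0 the fuel n.natAbs + 1 is never exhausted; for n < 0 Python diverges — excluded by Pre_)

def sodGo : Nat → Int → Int → Int
  | 0, _, sum1 => sum1
  | fuel + 1, n, sum1 =>
      if n = 0 then sum1
      else sodGo fuel (PySem.Int.floordiv n 10) (sum1 + PySem.Int.mod n 10)

def sumofdigits (n : Int) : Int := sodGo (n.natAbs + 1) n 0

def RulingPair (arr : List Int) (n : Int) : Int :=
  (arr.foldl (fun (st : PySem.Dict Int Int × Int) i =>
      let sod1 := sumofdigits i
      match st.1.get? sod1 with
      | some v =>
          let sumVal := i + v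
          let max1 := if sumVal > st.2 then sumVal else st.2
          (st.1.insert sod1 (max v i), max1)
      | none => (st.1.insert sod1 i, st.2)) (PySem.Dict.empty, -1)).2

-- ===== PORT B =====
def RulingPair_alt (arr : List Int) (n : Int) : Int :=
  let groups : PySem.Dict Int (List Int) :=
    arr.foldl (fun d x => d.modify (sumofdigits x) [] (· ++ [x])) PySem.Dict.empty
  groups.values.foldl (fun best g =>
    if 2 ≤ g.length then
      let p := g.foldl (fun (p : Int × Int) x =>
        if x > p.1 then (x, p.1) else if x > p.2 then (p.1, x) else p) (-1, -1)
      max best (p.1 + p.2)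
    else best) (-1)


-- ===== PRECONDITION & SPEC =====
-- Pre_ excludes lists containing a negative element: on those Python's sumofdigits never
-- terminates (n // 10 stops at -1), so A returns on exactly the inputs Pre_ admits.
def Pre_RulingPair (arr : List Int) (n : Int) : Prop := ∀ x ∈ arr, 0 ≤ x
instance (arr : List Int) (n : Int) : Decidable (Pre_RulingPair arr n) := by unfold Pre_RulingPair; infer_instance

def pvWitness_RulingPair : List Int × Int := ([55, 23, 32, 46, 88], 5)

def Spec_RulingPair (arr : List Int) (n : Int) (out : Int) : Prop := out = RulingPair_alt arr n
instance (arr : List Int) (n : Int) (out : Int) : Decidable (Spec_RulingPair arr n out) := by unfold Spec_RulingPair; infer_instance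

-- ===== CLAIM (what is proved, stated in full; the proofs are below) =====
def Claim_equal_RulingPair : Prop := ∀ (arr : List Int) (n : Int), Dom_RulingPair arr n → Pre_RulingPair arr n → Spec_RulingPair arr n (RulingPair arr n)

-- ===== LEMMAS AND PROOFS =====

-- the group of elements of digit-sum c
def filt (arr : List Int) (c : Int) : List Int := arr.filter (fun x => sumofdigits x == c)
def mval (g : List Int) : Int := g.foldl max (-1)
def t2 (g : List Int) : Int × Int :=
  g.foldl (fun (p : Int × Int) x =>
    if x > p.1 then (x, p.1) else if x > p.2 then (p.1, x) else p) (-1, -1)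
def contrib (g : List Int) : Int := if 2 ≤ g.length then (t2 g).1 + (t2 g).2 else -1
def bestSpec (arr : List Int) : Int :=
  ((PySem.Set.ofList (arr.map sumofdigits)).map (fun c => contrib (filt arr c))).foldl max (-1)
def stepA (st : PySem.Dict Int Int × Int) (i : Int) : PySem.Dict Int Int × Int :=
  match st.1.get? (sumofdigits i) with
  | some v => (st.1.insert (sumofdigits i) (max v i), if i + v > st.2 then i + v else st.2)
  | none => (st.1.insert (sumofdigits i) i, st.2)

theorem mval_append (g : List Int) (x : Int) : mval (g ++ [x]) = max (mval g) x := by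
  simp [mval, List.foldl_append]

theorem t2_facts (g : List Int) (h0 : ∀ x ∈ g, 0 ≤ x) :
    (t2 g).2 ≤ (t2 g).1 ∧ (t2 g).1 = mval g ∧
    (1 ≤ g.length → 0 ≤ (t2 g).1) ∧ (2 ≤ g.length → 0 ≤ (t2 g).2) ∧
    (g.length ≤ 1 → (t2 g).2 = -1) := by
  induction g using List.reverseRecOn with
  | nil => simp [t2, mval]
  | append_singleton g x ih =>
    have hx : 0 ≤ x := h0 x (by simp)
    obtain ⟨i1, i2, i3, i4, i5⟩ := ih (fun y hy => h0 y (by simp [hy]))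
    have i3' : 1 ≤ g.length → 0 ≤ mval g := fun h => i2 ▸ i3 h
    have hnil : g.length = 0 → mval g = -1 := by
      intro h; rw [List.length_eq_zero_iff] at h; subst h; rfl
    have hstep : t2 (g ++ [x]) =
        (if x > (t2 g).1 then (x, (t2 g).1)
         else if x > (t2 g).2 then ((t2 g).1, x) else (t2 g)) := by
      simp [t2, List.foldl_append]
    rw [i2] at i1 hstep
    rw [hstep, mval_append]
    simp only [List.length_append, List.length_singleton]
    split_ifs with h1 h2
    · exact ⟨le_of_lt h1, (max_eq_right h1.le).symm, fun _ => hx,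
        fun h => i3' (by omega), fun h => hnil (by omega)⟩
    · exact ⟨le_of_not_gt h1, (max_eq_left (le_of_not_gt h1)).symm,
        fun _ => le_trans hx (le_of_not_gt h1), fun _ => hx,
        fun h => by have := hnil (by omega); omega⟩
    · rw [i2]
      exact ⟨i1, (max_eq_left (le_of_not_gt h1)).symm,
        fun _ => le_trans hx (le_trans (le_of_not_gt h2) i1),
        fun _ => le_trans hx (le_of_not_gt h2),
        fun h => i5 (by omega)⟩

theorem contrib_append (g : List Int) (x : Int) (hg : g ≠ []) (hx : 0 ≤ x)
    (h0 : ∀ y ∈ g, 0 ≤ y) :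
    contrib (g ++ [x]) = max (contrib g) (x + mval g) := by
  obtain ⟨i1, i2, i3, i4, i5⟩ := t2_facts g h0
  have hL : 1 ≤ g.length := by
    rcases g with _ | ⟨a, t⟩
    · exact absurd rfl hg
    · simp
  have hm : 0 ≤ mval g := i2 ▸ i3 hL
  have hstep : t2 (g ++ [x]) =
      (if x > (t2 g).1 then (x, (t2 g).1)
       else if x > (t2 g).2 then ((t2 g).1, x) else (t2 g)) := by
    simp [t2, List.foldl_append]
  rw [i2] at i1 hstep
  simp only [contrib, List.length_append, List.length_singleton, hstep, i2]
  rw [if_pos (show 2 ≤ g.length + 1 by omega)]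
  by_cases hc : 2 ≤ g.length
  · have hB : 0 ≤ (t2 g).2 := i4 hc
    rw [if_pos hc]
    split_ifs with hA hB2 <;> (try dsimp only) <;> omega
  · have hB1 : (t2 g).2 = -1 := i5 (by omega)
    rw [if_neg hc]
    split_ifs with hA hB2 <;> (try dsimp only) <;> omega

theorem foldl_max_pull (l : List Int) (s y : Int) :
    l.foldl max (max s y) = max (l.foldl max s) y := by
  induction l generalizing s with
  | nil => rfl
  | cons a l ih => simpa [List.foldl_cons, max_right_comm s y a] using ih (max s a)

theorem foldl_max_middle (l1 l2 : List Int) (d y : Int) :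
    (l1 ++ y :: l2).foldl max d = max ((l1 ++ l2).foldl max d) y := by
  simp only [List.foldl_append, List.foldl_cons]
  exact foldl_max_pull l2 _ y

theorem le_foldl_max' (l : List Int) (s : Int) : s ≤ l.foldl max s := by
  induction l generalizing s with
  | nil => exact le_refl s
  | cons a l ih => exact le_trans (le_max_left s a) (ih (max s a))

theorem bstep_fold (vals : List (List Int)) (b : Int) (hb : -1 ≤ b) :
    vals.foldl (fun best g =>
      if 2 ≤ g.length then
        max best ((g.foldl (fun (p : Int × Int) x =>
          if x > p.1 then (x, p.1) else if x > p.2 then (p.1, x) else p) (-1, -1)).1 +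
          (g.foldl (fun (p : Int × Int) x =>
          if x > p.1 then (x, p.1) else if x > p.2 then (p.1, x) else p) (-1, -1)).2)
      else best) b
    = (vals.map contrib).foldl max b := by
  induction vals generalizing b with
  | nil => rfl
  | cons g vs ih =>
    simp only [List.foldl_cons, List.map_cons]
    by_cases h : 2 ≤ g.length
    · rw [if_pos h, show contrib g = (t2 g).1 + (t2 g).2 from by rw [contrib, if_pos h]]
      exact ih _ (le_trans hb (le_max_left _ _))
    · rw [if_neg h, show contrib g = (-1 : Int) from by rw [contrib, if_neg h], max_eq_left hb]
      exact ih b hb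

theorem alt_eq_bestSpec (arr : List Int) (n : Int) : RulingPair_alt arr n = bestSpec arr := by
  simp only [RulingPair_alt, bestSpec]
  have hkeys : (arr.foldl (fun d x => d.modify (sumofdigits x) [] (· ++ [x])) PySem.Dict.empty).keys
      = PySem.Set.ofList (arr.map sumofdigits) := by
    rw [PySem.Dict.keys_foldl_modify_key]
    simp [PySem.Set.update_nil_left]
  have hnodup : (arr.foldl (fun d x => d.modify (sumofdigits x) [] (· ++ [x])) PySem.Dict.empty).keys.Nodup := by
    rw [hkeys]; exact PySem.Set.nodup_ofList _
  have hget : ∀ c, (arr.foldl (fun d x => d.modify (sumofdigits x) [] (· ++ [x])) PySem.Dict.empty).getD c [] = filt arr c := by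
    intro c
    rw [show arr.foldl (fun d x => d.modify (sumofdigits x) [] (· ++ [x])) PySem.Dict.empty
        = (arr.map (fun x => (sumofdigits x, x))).foldl (fun d p => d.modify p.1 [] (· ++ [p.2])) PySem.Dict.empty
      from by rw [List.foldl_map]]
    rw [PySem.Dict.getD_foldl_modify_append]
    simp [filt, List.filter_map, Function.comp_def]
  rw [PySem.Dict.values_eq_map_keys _ hnodup [], hkeys]
  rw [bstep_fold _ _ (le_refl (-1)), List.map_map]
  congr 1
  exact List.map_congr_left (fun c _ => by simp [hget c, contrib])

theorem A_invariant (arr : List Int) (h0 : ∀ x ∈ arr, 0 ≤ x) :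
    (∀ c, (arr.foldl stepA (PySem.Dict.empty, -1)).1.get? c =
        if filt arr c = [] then none else some (mval (filt arr c))) ∧
    (arr.foldl stepA (PySem.Dict.empty, -1)).2 = bestSpec arr := by
  induction arr using List.reverseRecOn with
  | nil =>
    constructor
    · intro c; simp [filt, PySem.Dict.get?_empty]
    · rfl
  | append_singleton arr x ih =>
    have hx : 0 ≤ x := h0 x (by simp)
    obtain ⟨IH1, IH2⟩ := ih (fun y hy => h0 y (by simp [hy]))
    have hfilt : ∀ c, filt (arr ++ [x]) c =
        filt arr c ++ (if sumofdigits x = c then [x] else []) := by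
      intro c
      by_cases h : sumofdigits x = c <;> simp [filt, List.filter_append, h]
    have hmemiff : filt arr (sumofdigits x) = [] ↔ sumofdigits x ∉ arr.map sumofdigits := by
      simp only [filt, List.filter_eq_nil_iff, beq_iff_eq, List.mem_map, not_exists]
      tauto
    rw [List.foldl_append, List.foldl_cons, List.foldl_nil]
    by_cases hcase : filt arr (sumofdigits x) = []
    · -- new key
      have hk : sumofdigits x ∉ arr.map sumofdigits := hmemiff.mp hcase
      have hgetnone : (arr.foldl stepA (PySem.Dict.empty, -1)).1.get? (sumofdigits x) = none := by
        rw [IH1, if_pos hcase]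
      have hstep : stepA (arr.foldl stepA (PySem.Dict.empty, -1)) x =
          ((arr.foldl stepA (PySem.Dict.empty, -1)).1.insert (sumofdigits x) x,
           (arr.foldl stepA (PySem.Dict.empty, -1)).2) := by
        simp only [stepA, hgetnone]
      rw [hstep]
      constructor
      · intro c
        by_cases hck : c = sumofdigits x
        · subst hck
          rw [PySem.Dict.get?_insert, if_pos rfl, hfilt _, if_pos rfl, hcase]
          simp [mval, max_eq_right (show (-1 : Int) ≤ x by omega)]
        · have hni : filt (arr ++ [x]) c = filt arr c := by
            rw [hfilt c, if_neg (fun h => hck h.symm), List.append_nil]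
          rw [PySem.Dict.get?_insert, if_neg hck, hni]
          exact IH1 c
      · rw [IH2]
        unfold bestSpec
        rw [List.map_append, List.map_singleton, PySem.Set.ofList_append_singleton,
          PySem.Set.add_of_not_mem (by rwa [PySem.Set.mem_ofList])]
        rw [List.map_append, List.map_singleton, List.foldl_append, List.foldl_cons, List.foldl_nil]
        have hcongr : (PySem.Set.ofList (arr.map sumofdigits)).map (fun c => contrib (filt (arr ++ [x]) c))
            = (PySem.Set.ofList (arr.map sumofdigits)).map (fun c => contrib (filt arr c)) := by
          apply List.map_congr_left
          intro c hc
          have hck : sumofdigits x ≠ c := by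
            rw [PySem.Set.mem_ofList] at hc
            intro h; exact hk (h ▸ hc)
          rw [hfilt c, if_neg hck, List.append_nil]
        rw [hcongr]
        have hone : contrib (filt (arr ++ [x]) (sumofdigits x)) = -1 := by
          rw [hfilt _, if_pos rfl, hcase]
          rfl
        rw [hone, max_eq_left (le_foldl_max' _ _)]
    · -- existing key
      have hkmem : sumofdigits x ∈ arr.map sumofdigits := by
        by_contra h
        exact hcase (hmemiff.mpr h)
      have hgetsome : (arr.foldl stepA (PySem.Dict.empty, -1)).1.get? (sumofdigits x) =
          some (mval (filt arr (sumofdigits x))) := by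
        rw [IH1, if_neg hcase]
      have hstep : stepA (arr.foldl stepA (PySem.Dict.empty, -1)) x =
          ((arr.foldl stepA (PySem.Dict.empty, -1)).1.insert (sumofdigits x)
             (max (mval (filt arr (sumofdigits x))) x),
           max ((arr.foldl stepA (PySem.Dict.empty, -1)).2)
             (x + mval (filt arr (sumofdigits x)))) := by
        simp only [stepA, hgetsome]
        congr 1
        rw [max_def]
        split_ifs <;> omega
      rw [hstep]
      constructor
      · intro c
        by_cases hck : c = sumofdigits x
        · subst hck
          rw [PySem.Dict.get?_insert, if_pos rfl, hfilt _, if_pos rfl]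
          simp [mval_append]
        · have hni : filt (arr ++ [x]) c = filt arr c := by
            rw [hfilt c, if_neg (fun h => hck h.symm), List.append_nil]
          rw [PySem.Dict.get?_insert, if_neg hck, hni]
          exact IH1 c
      · rw [IH2]
        unfold bestSpec
        rw [List.map_append, List.map_singleton, PySem.Set.ofList_append_singleton,
          PySem.Set.add_of_mem (by rwa [PySem.Set.mem_ofList])]
        have hnd : (PySem.Set.ofList (arr.map sumofdigits)).Nodup := PySem.Set.nodup_ofList _
        have hkin : sumofdigits x ∈ PySem.Set.ofList (arr.map sumofdigits) := by
          rwa [PySem.Set.mem_ofList]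
        obtain ⟨l1, l2, hsplit⟩ := List.append_of_mem hkin
        rw [hsplit] at hnd
        obtain ⟨h1n, h2n, hdisj⟩ := List.nodup_append.mp hnd
        have hk1 : sumofdigits x ∉ l1 := by
          intro h
          exact hdisj _ h _ List.mem_cons_self rfl
        have hk2 : sumofdigits x ∉ l2 := (List.nodup_cons.mp h2n).1
        rw [hsplit, List.map_append, List.map_cons, List.map_append, List.map_cons,
          foldl_max_middle, foldl_max_middle]
        have e1 : List.map (fun c => contrib (filt (arr ++ [x]) c)) l1
            = List.map (fun c => contrib (filt arr c)) l1 :=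
          List.map_congr_left (fun c hc => by
            have hne' : sumofdigits x ≠ c := fun h => hk1 (h ▸ hc)
            rw [hfilt c, if_neg hne', List.append_nil])
        have e2 : List.map (fun c => contrib (filt (arr ++ [x]) c)) l2
            = List.map (fun c => contrib (filt arr c)) l2 :=
          List.map_congr_left (fun c hc => by
            have hne' : sumofdigits x ≠ c := fun h => hk2 (h ▸ hc)
            rw [hfilt c, if_neg hne', List.append_nil])
        have emid : contrib (filt (arr ++ [x]) (sumofdigits x))
            = max (contrib (filt arr (sumofdigits x))) (x + mval (filt arr (sumofdigits x))) := by
          rw [hfilt _, if_pos rfl]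
          exact contrib_append _ x hcase hx (fun y hy => h0 y (by
            simp only [filt, List.mem_filter] at hy
            simp [hy.1]))
        rw [e1, e2, emid]
        omega

-- ===== VERDICT (by name: the statement is the Claim_ definition above) =====
theorem RulingPair_spec : Claim_equal_RulingPair := by
  intro arr n _ hpre
  unfold Spec_RulingPair
  have hA : RulingPair arr n = (arr.foldl stepA (PySem.Dict.empty, -1)).2 := rfl
  rw [hA, (A_invariant arr hpre).2, alt_eq_bestSpec arr n]
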